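-- pv_equiv track=rewrite | github.com/Frostyniano/Riballo-Symmetry-Axis-Labeling-Application | src/data_manager.py | _extract_config_from_filename
-- ===== SOURCE A (Python) =====
-- def _extract_config_from_filename(filename):
--     """
--     Extracts the configuration string from a result CSV filename.
--     Example filename: 'session_results_YYYYMMDD_HHMMSS_Q50_TYY40_TYN30_TN80_TF30.csv'
--     It extracts 'Q50_TYY40_TYN30_TN80_TF30'.
--     Args:
--         filename (str): The base name of the file (e.g., 'session_results_...csv').
--     Returns:
--         str: The extracted configuration string, or an empty string if not found.
--     """
--     parts = filename.split('_')
--     for part in parts: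
--         if part.startswith("Q"): # Look for the part starting with 'Q'
--             # Assuming the full config string starts with 'Q' and ends before '.csv'
--             config_str_start_index = parts.index(part) # Get the index where 'Q' part begins
--             full_config_str = "_".join(parts[config_str_start_index:]) # Join parts from 'Q' onwards
--             if full_config_str.endswith(".csv"): # Remove .csv extension if present
--                 full_config_str = full_config_str[:-4]
--             return full_config_str
--     return "" # Return empty string if no config part found
-- ===== SOURCE B (Python) =====
-- def _extract_config_from_filename(filename):
--     """Single left-to-right character scan: return the suffix starting at the
--     first 'Q' that begins an underscore-separated segment, minus a trailing '.csv'."""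
--     at_start = True
--     for i, ch in enumerate(filename):
--         if at_start and ch == 'Q':
--             cfg = filename[i:]
--             return cfg[:-4] if cfg.endswith('.csv') else cfg
--         at_start = (ch == '_')
--     return ''
-- ===== Notes on version B (the rewrite author's own statement) =====
-- stated objective: simpler
-- what changed: Replaces split-on-underscore + per-part startswith loop + parts.index + join-of-remaining-parts with a single left-to-right character scan that tracks whether the current position starts a underscore segment and returns the suffix directly.
import Mathlib
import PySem

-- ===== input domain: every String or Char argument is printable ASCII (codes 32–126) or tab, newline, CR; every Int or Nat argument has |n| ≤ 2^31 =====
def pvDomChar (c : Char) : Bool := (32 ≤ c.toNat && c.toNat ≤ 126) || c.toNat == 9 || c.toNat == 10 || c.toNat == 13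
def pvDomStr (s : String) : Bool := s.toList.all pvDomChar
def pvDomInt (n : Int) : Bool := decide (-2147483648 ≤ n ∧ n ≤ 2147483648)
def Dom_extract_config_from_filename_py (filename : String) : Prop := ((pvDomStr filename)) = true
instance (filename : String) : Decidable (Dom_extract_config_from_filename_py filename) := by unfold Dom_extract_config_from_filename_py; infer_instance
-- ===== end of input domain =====

-- B replaces A's split/index/join pipeline by one character scan over the string; objective: simpler.

-- ===== PORT A =====
-- A's 'for part in parts' loop; the full parts list is carried for parts.index(part).
def extractA_loop (parts : List String) : List String → String
  | [] => ""                                   -- fell off the loop: return ""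
  | p :: rest =>
    if PySem.Str.startswith p "Q" then
      match PySem.List.index? parts p with     -- parts.index(part); none = ValueError, unreachable since p ∈ parts
      | none => ""
      | some i =>
        let full := PySem.Str.join "_" (PySem.List.slice parts (some (i : Int)) none)  -- "_".join(parts[i:])
        if PySem.Str.endswith full ".csv" then PySem.Str.slice full none (some (-4)) else full
    else extractA_loop parts rest

def extract_config_from_filename_py (filename : String) : String :=
  match PySem.Str.split? filename "_" with     -- filename.split('_'); sep "_" ≠ "" so always some
  | none => ""
  | some parts => extractA_loop parts parts

-- ===== PORT B =====
-- B's 'for i, ch in enumerate(filename)' loop with the at_start flag.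
def extractB_loop (filename : String) : List (Int × Char) → Bool → String
  | [], _ => ""
  | (i, ch) :: rest, atStart =>
    if atStart && (ch == 'Q') then
      let cfg := PySem.Str.slice filename (some i) none            -- filename[i:]
      if PySem.Str.endswith cfg ".csv" then PySem.Str.slice cfg none (some (-4)) else cfg
    else extractB_loop filename rest (ch == '_')

def extract_config_from_filename_py_alt (filename : String) : String :=
  extractB_loop filename (PySem.List.enumerate filename.toList) true

-- ===== PRECONDITION & SPEC =====
def Spec_extract_config_from_filename_py (filename : String) (out : String) : Prop := out = extract_config_from_filename_py_alt filename
instance (filename : String) (out : String) : Decidable (Spec_extract_config_from_filename_py filename out) := by unfold Spec_extract_config_from_filename_py; infer_instance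

-- ===== CLAIM (what is proved, stated in full; the proofs are below) =====
def Claim_equal_extract_config_from_filename_py : Prop := ∀ (filename : String), Dom_extract_config_from_filename_py filename → Spec_extract_config_from_filename_py filename (extract_config_from_filename_py filename)

-- ===== LEMMAS AND PROOFS =====

-- Python's single-char split, written structurally (proved equal to PySem's fuelled splitOn below).
def pySplit1 (c : Char) : List Char → List (List Char)
  | [] => [[]]
  | a :: rest =>
    if a = c then [] :: pySplit1 c rest
    else
      match pySplit1 c rest with
      | [] => [[a]]
      | h :: t => (a :: h) :: t

-- what A's loop computes: the first part starting with 'Q', joined with all the following parts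
def firstQC : List (List Char) → Option (List Char)
  | [] => none
  | p :: rest => if PySem.Chars.startswith p ['Q'] then some (PySem.Chars.join ['_'] (p :: rest)) else firstQC rest

def firstQS : List String → Option String
  | [] => none
  | p :: rest => if PySem.Str.startswith p "Q" then some (PySem.Str.join "_" (p :: rest)) else firstQS rest

-- what B's scan computes: the suffix at the first segment-initial 'Q'
def scanC : List Char → Bool → Option (List Char)
  | [], _ => none
  | c :: rest, atStart => if atStart && (c == 'Q') then some (c :: rest) else scanC rest (c == '_')

def stripCsv (s : String) : String :=
  if PySem.Str.endswith s ".csv" then PySem.Str.slice s none (some (-4)) else s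

theorem pySplit1_ne_nil (c : Char) (l : List Char) : pySplit1 c l ≠ [] := by
  cases l with
  | nil => simp [pySplit1]
  | cons a rest =>
    simp only [pySplit1]
    split
    · simp
    · split <;> simp

theorem go_spec (c : Char) : ∀ (fuel : Nat) (l cur : List Char) (acc : List (List Char)),
    l.length < fuel →
    PySem.Chars.splitOn.go [c] fuel l cur acc =
      acc.reverse ++ (match pySplit1 c l with
                      | [] => [cur.reverse]
                      | h :: t => (cur.reverse ++ h) :: t) := by
  intro fuel
  induction fuel with
  | zero => intro l cur acc h; omega
  | succ f ih =>
    intro l cur acc h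
    cases l with
    | nil =>
      simp [PySem.Chars.splitOn.go, pySplit1]
    | cons a rest =>
      rw [PySem.Chars.splitOn.go]
      by_cases hac : a = c
      · subst hac
        have hpre : [a].isPrefixOf (a :: rest) = true := by simp [List.isPrefixOf]
        simp only [hpre, if_pos]
        rw [ih _ _ _ (by simpa using Nat.lt_of_succ_lt_succ h)]
        simp only [pySplit1, if_pos]
        cases hs : pySplit1 a rest with
        | nil => exact absurd hs (pySplit1_ne_nil a rest)
        | cons h t => simp only [List.length_cons, List.length_nil, List.drop_succ_cons, List.drop_zero]; rw [hs]; simp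
      · have hpre : [c].isPrefixOf (a :: rest) = false := by
          simp [List.isPrefixOf]
          intro hh; exact absurd hh.symm hac
        simp only [hpre, Bool.false_eq_true, if_false]
        rw [ih _ _ _ (by simpa using Nat.lt_of_succ_lt_succ h)]
        simp only [pySplit1, if_neg hac]
        cases hs : pySplit1 c rest with
        | nil => exact absurd hs (pySplit1_ne_nil c rest)
        | cons h t => simp

theorem splitOn_eq_pySplit1 (c : Char) (l : List Char) :
    PySem.Chars.splitOn l [c] = pySplit1 c l := by
  rw [PySem.Chars.splitOn, go_spec c _ _ _ _ (Nat.lt_succ_self _)]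
  cases hs : pySplit1 c l with
  | nil => exact absurd hs (pySplit1_ne_nil c l)
  | cons h t => simp

theorem join_pySplit1 (c : Char) (l : List Char) :
    PySem.Chars.join [c] (pySplit1 c l) = l := by
  induction l with
  | nil => simp [pySplit1, PySem.Chars.join_singleton]
  | cons a rest ih =>
    simp only [pySplit1]
    by_cases hac : a = c
    · subst hac
      rw [if_pos rfl]
      cases hs : pySplit1 a rest with
      | nil => exact absurd hs (pySplit1_ne_nil a rest)
      | cons h t =>
        rw [hs] at ih
        rw [PySem.Chars.join_cons_cons]
        simpa using ih
    · rw [if_neg hac]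
      cases hs : pySplit1 c rest with
      | nil => exact absurd hs (pySplit1_ne_nil c rest)
      | cons h t =>
        rw [hs] at ih
        cases t with
        | nil => rw [PySem.Chars.join_singleton] at ih ⊢; simp [ih]
        | cons t0 t' =>
          rw [PySem.Chars.join_cons_cons] at ih ⊢
          simp [ih]

theorem index?_append (p : String) (rest : List String) : ∀ pre : List String, p ∉ pre →
    PySem.List.index? (pre ++ p :: rest) p = some pre.length := by
  intro pre
  induction pre with
  | nil => intro _; simp [PySem.List.index?, List.idxOf?_cons]
  | cons q pre ih =>
    intro hp
    simp only [List.mem_cons, not_or] at hp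
    have hqp : (q == p) = false := beq_eq_false_iff_ne.mpr (fun h => hp.1 h.symm)
    simp only [List.cons_append, PySem.List.index?] at ih ⊢
    rw [List.idxOf?_cons, hqp, ih hp.2]
    simp

theorem A_loop_spec : ∀ (rest pre : List String), (∀ q ∈ pre, PySem.Str.startswith q "Q" = false) →
    extractA_loop (pre ++ rest) rest = ((firstQS rest).map stripCsv).getD "" := by
  intro rest
  induction rest with
  | nil => intro pre _; simp [extractA_loop, firstQS]
  | cons p rest ih =>
    intro pre hpre
    by_cases hq : PySem.Str.startswith p "Q" = true
    · have hnot : p ∉ pre := by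
        intro hmem
        have h2 := hpre p hmem
        rw [h2] at hq
        exact Bool.false_ne_true hq
      have hqC : PySem.Chars.startswith p.toList ['Q'] = true := by
        simpa using hq
      simp only [extractA_loop, hq, if_pos, index?_append p rest pre hnot]
      rw [PySem.List.slice_from _ (Int.natCast_nonneg _), Int.toNat_natCast, List.drop_left]
      simp [firstQS, hqC, stripCsv]
    · have hq' : PySem.Str.startswith p "Q" = false := by
        cases hb : PySem.Str.startswith p "Q" <;> simp_all
      simp only [extractA_loop, hq', Bool.false_eq_true, if_false]
      have := ih (pre ++ [p]) (by
        intro q hmem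
        rcases List.mem_append.mp hmem with h | h
        · exact hpre q h
        · simp only [List.mem_singleton] at h; subst h; exact hq')
      rw [List.append_assoc] at this
      simp only [List.singleton_append] at this
      rw [this]
      have hqC : PySem.Chars.startswith p.toList ['Q'] = false := by
        simpa using hq'
      simp [firstQS, hqC]

theorem firstQS_map (l : List (List Char)) :
    firstQS (l.map String.ofList) = (firstQC l).map String.ofList := by
  induction l with
  | nil => simp [firstQS, firstQC]
  | cons p rest ih =>
    simp only [List.map_cons, firstQS, firstQC]
    rw [PySem.Str.startswith_eq, String.toList_ofList]
    have : ("Q" : String).toList = ['Q'] := rfl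
    rw [this]
    by_cases hq : PySem.Chars.startswith p ['Q'] = true
    · simp only [hq, if_pos, Option.map_some]
      congr 1
      rw [PySem.Str.join]
      have hcomp : (String.toList ∘ String.ofList) = id := funext (fun x => String.toList_ofList)
      have hmap : List.map String.toList (String.ofList p :: List.map String.ofList rest)
          = p :: rest := by
        simp only [List.map_cons, String.toList_ofList, List.map_map, hcomp, List.map_id]
      rw [hmap]
      rfl
    · simp only [hq, Bool.false_eq_true, if_false]
      exact ih

theorem main_scan (cs : List Char) :
    firstQC (pySplit1 '_' cs) = scanC cs true ∧ firstQC ((pySplit1 '_' cs).tail) = scanC cs false := by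
  induction cs with
  | nil =>
    constructor <;> simp [pySplit1, firstQC, scanC, PySem.Chars.startswith, List.isPrefixOf]
  | cons c rest ih =>
    obtain ⟨ih1, ih2⟩ := ih
    by_cases hc : c = '_'
    · subst hc
      simp only [pySplit1, if_pos]
      have h1 : PySem.Chars.startswith [] ['Q'] = false := by
        simp [PySem.Chars.startswith, List.isPrefixOf]
      have h2 : (('_' : Char) == 'Q') = false := by decide
      have h3 : (('_' : Char) == '_') = true := by decide
      constructor
      · simp only [firstQC, h1, Bool.false_eq_true, if_false, scanC, h2, Bool.and_false,
          Bool.false_eq_true, if_false, h3]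
        exact ih1
      · simp only [List.tail_cons, scanC, h2, Bool.and_false, Bool.false_eq_true, if_false, h3]
        exact ih1
    · simp only [pySplit1, if_neg hc]
      have hc' : (c == '_') = false := beq_eq_false_iff_ne.mpr hc
      cases hs : pySplit1 '_' rest with
      | nil => exact absurd hs (pySplit1_ne_nil '_' rest)
      | cons h t =>
        rw [hs] at ih2
        simp only [List.tail_cons] at ih2
        constructor
        · by_cases hq : c = 'Q'
          · subst hq
            have hsw : PySem.Chars.startswith ('Q' :: h) ['Q'] = true := by
              simp [PySem.Chars.startswith, List.isPrefixOf]
            have hj : PySem.Chars.join ['_'] (('Q' :: h) :: t) = 'Q' :: rest := by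
              have hj0 := join_pySplit1 '_' ('Q' :: rest)
              simp only [pySplit1, if_neg hc, hs] at hj0
              exact hj0
            simp only [firstQC, hsw, if_pos, scanC, Bool.true_and, beq_self_eq_true, if_pos, hj]
          · have hq' : (c == 'Q') = false := beq_eq_false_iff_ne.mpr hq
            have hsw : PySem.Chars.startswith (c :: h) ['Q'] = false := by
              have hqc : (('Q' : Char) == c) = false := beq_eq_false_iff_ne.mpr (fun hh => hq hh.symm)
              simp [PySem.Chars.startswith, List.isPrefixOf, hqc]
            simp only [firstQC, hsw, Bool.false_eq_true, if_false, scanC, hq', Bool.and_false,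
              Bool.false_eq_true, if_false, hc']
            exact ih2
        · simp only [List.tail_cons, scanC, Bool.false_and, Bool.false_eq_true, if_false, hc']
          exact ih2

theorem A_char (filename : String) :
    extract_config_from_filename_py filename
      = ((firstQC (pySplit1 '_' filename.toList)).map String.ofList).elim "" stripCsv := by
  have hsep : ("_" : String).toList = ['_'] := rfl
  have hsplit : PySem.Str.split? filename "_"
      = some ((pySplit1 '_' filename.toList).map String.ofList) := by
    rw [PySem.Str.split?, hsep, PySem.Chars.split?]
    simp [splitOn_eq_pySplit1]
  rw [extract_config_from_filename_py, hsplit]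
  show extractA_loop (List.map String.ofList (pySplit1 '_' filename.toList))
      (List.map String.ofList (pySplit1 '_' filename.toList)) = _
  have := A_loop_spec ((pySplit1 '_' filename.toList).map String.ofList) [] (by simp)
  simp only [List.nil_append] at this
  rw [this, firstQS_map]
  cases firstQC (pySplit1 '_' filename.toList) <;> simp

theorem B_loop_spec (s : String) : ∀ (l : List Char) (k : Nat) (atStart : Bool),
    l = s.toList.drop k →
    extractB_loop s (PySem.List.enumerate l (k : Int)) atStart
      = ((scanC l atStart).map String.ofList).elim "" stripCsv := by
  intro l
  induction l with
  | nil => intro k a _; simp [PySem.List.enumerate, extractB_loop, scanC]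
  | cons c l' ih =>
    intro k atStart hk
    rw [PySem.List.enumerate_cons]
    by_cases hcond : (atStart && (c == 'Q')) = true
    · have hcfg : PySem.Str.slice s (some ((k : Nat) : Int)) none = String.ofList (c :: l') := by
        have h1 : (PySem.Str.slice s (some ((k : Nat) : Int)) none).toList = c :: l' := by
          rw [PySem.Str.toList_slice, PySem.Chars.slice_eq_listSlice,
            PySem.List.slice_from _ (Int.natCast_nonneg _), Int.toNat_natCast, ← hk]
        rw [← String.ofList_toList (s := PySem.Str.slice s (some ((k : Nat) : Int)) none), h1]
      simp only [extractB_loop, hcond, if_pos, scanC, hcfg]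
      simp [stripCsv]
    · have hcond' : (atStart && (c == 'Q')) = false := by
        cases hb : atStart && (c == 'Q') <;> simp_all
      have hk' : l' = s.toList.drop (k + 1) := by
        have : List.drop 1 (List.drop k s.toList) = List.drop (k + 1) s.toList := by
          rw [List.drop_drop]
        rw [← this, ← hk, List.drop_one, List.tail_cons]
      have hcast : ((k : Nat) : Int) + 1 = (((k + 1 : Nat)) : Int) := by push_cast; ring
      simp only [extractB_loop, hcond', Bool.false_eq_true, if_false, scanC, hcast]
      exact ih (k + 1) (c == '_') hk'

theorem B_char (filename : String) :
    extract_config_from_filename_py_alt filename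
      = ((scanC filename.toList true).map String.ofList).elim "" stripCsv := by
  rw [extract_config_from_filename_py_alt]
  have := B_loop_spec filename filename.toList 0 true (by simp)
  simpa using this

-- ===== VERDICT (by name: the statement is the Claim_ definition above) =====
theorem extract_config_from_filename_py_spec : Claim_equal_extract_config_from_filename_py := by
  intro filename _
  unfold Spec_extract_config_from_filename_py
  rw [A_char, B_char, (main_scan filename.toList).1]
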